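-- pv_equiv track=rewrite | github.com/Ionnia/EVM-8-sem | algorithms.py | get_max_b_indicies
-- ===== SOURCE A (Python) =====
-- def get_max_b_indicies(b):
--     group1_index = 0
--     group2_index = 0
--     for i in range(0, len(b)):
--         for j in range(0, len(b[i])):
--             if b[group1_index][group2_index] < b[i][j]:
--                 group1_index, group2_index = i, j
--     return group1_index, group2_index
-- ===== SOURCE B (Python) =====
-- def get_max_b_indicies(b):
--     # Two-stage reduction: per-row (max value, first argmax), then pick the
--     # first row whose best strictly beats the running best.
--     best = None  # (value, i, j)
--     for i, row in enumerate(b):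
--         if not row:
--             continue
--         v = max(row)
--         j = row.index(v)
--         if best is None or v > best[0]:
--             best = (v, i, j)
--     if best is None:
--         return (0, 0)
--     return (best[1], best[2])
-- ===== Notes on version B (the rewrite author's own statement) =====
-- stated objective: alternative
-- what changed: Replaces A's single nested scan holding running argmax indices by a two-stage reduction: per row compute (max value, first argmax via max/index), then a linear scan over row summaries keeping the first strictly greater one.
-- crash fix: A raises IndexError when the first row is empty but some later row is non-empty (it indexes b[0][0] before any update); B returns the row-major argmax of the non-empty rows there. — e.g. on get_max_b_indicies([[], [5]]): A raises IndexError, B returns (1, 0)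
import Mathlib
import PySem

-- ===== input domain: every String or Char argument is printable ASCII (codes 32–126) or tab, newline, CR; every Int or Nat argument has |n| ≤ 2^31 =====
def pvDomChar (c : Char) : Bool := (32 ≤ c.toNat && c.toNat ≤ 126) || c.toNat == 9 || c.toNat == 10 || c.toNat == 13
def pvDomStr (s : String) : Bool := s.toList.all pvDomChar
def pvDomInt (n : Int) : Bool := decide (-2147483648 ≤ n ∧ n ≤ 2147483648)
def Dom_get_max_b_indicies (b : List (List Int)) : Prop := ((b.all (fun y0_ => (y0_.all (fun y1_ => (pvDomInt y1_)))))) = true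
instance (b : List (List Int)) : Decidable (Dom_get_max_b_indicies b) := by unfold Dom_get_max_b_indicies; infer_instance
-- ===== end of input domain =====

-- B restructures A's single nested argmax scan as a two-stage reduction (per-row best, then a scan
-- of row summaries); equivalence is claimed on inputs where A does not raise (see Pre_ below).

-- ===== PORT A =====
def get_max_b_indicies (b : List (List Int)) : Int × Int :=
  (PySem.List.pyRange 0 (b.length : Int)).foldl (fun st i =>
    (PySem.List.pyRange 0 ((PySem.List.pyGetD b i []).length : Int)).foldl (fun st2 j =>
      if PySem.List.pyGetD (PySem.List.pyGetD b st2.1 []) st2.2 0 <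
         PySem.List.pyGetD (PySem.List.pyGetD b i []) j 0
      then (i, j) else st2) st) (0, 0)

-- ===== PORT B =====
def get_max_b_indicies_alt (b : List (List Int)) : Int × Int :=
  let best := (PySem.List.enumerate b).foldl (fun (acc : Option (Int × Int × Int)) p =>
    if p.2 = [] then acc
    else
      let v : Int := (PySem.List.max? p.2 id).getD 0
      let j : Nat := (PySem.List.index? p.2 v).getD 0
      match acc with
      | none => some (v, p.1, (j : Int))
      | some b0 => if b0.1 < v then some (v, p.1, (j : Int)) else acc) none
  match best with
  | none => (0, 0)
  | some t => (t.2.1, t.2.2)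

-- ===== PRECONDITION & SPEC =====
-- Pre_ excludes exactly the inputs where A raises IndexError: a non-empty b whose first row is
-- empty while some row is non-empty (A reads b[0][0] before the first update).
def Pre_get_max_b_indicies (b : List (List Int)) : Prop :=
  (∀ r ∈ b, r = []) ∨ b.head?.getD [] ≠ []
instance (b : List (List Int)) : Decidable (Pre_get_max_b_indicies b) := by
  unfold Pre_get_max_b_indicies; infer_instance
def pvWitness_get_max_b_indicies : List (List Int) := [[1, 2], [3]]

-- A raises IndexError when the first row of b is empty but some later row is non-empty; B returns
-- the row-major argmax of the non-empty rows there.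
def Raises_get_max_b_indicies (b : List (List Int)) : Prop :=
  b.head?.getD [] = [] ∧ ∃ r ∈ b, r ≠ []
instance (b : List (List Int)) : Decidable (Raises_get_max_b_indicies b) := by
  unfold Raises_get_max_b_indicies; infer_instance
def pvRaiseWitness_get_max_b_indicies : List (List Int) := [[], [5]]
def pvRaiseWitnessOut_get_max_b_indicies : Int × Int := (1, 0)

def Spec_get_max_b_indicies (b : List (List Int)) (out : Int × Int) : Prop :=
  out = get_max_b_indicies_alt b
instance (b : List (List Int)) (out : Int × Int) : Decidable (Spec_get_max_b_indicies b out) := by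
  unfold Spec_get_max_b_indicies; infer_instance

-- ===== CLAIM (what is proved, stated in full; the proofs are below) =====
def Claim_equal_get_max_b_indicies : Prop := ∀ (b : List (List Int)), Dom_get_max_b_indicies b → Pre_get_max_b_indicies b → Spec_get_max_b_indicies b (get_max_b_indicies b)
def Claim_raises_get_max_b_indicies : Prop := (∀ (b : List (List Int)), Dom_get_max_b_indicies b → Raises_get_max_b_indicies b → ¬ Pre_get_max_b_indicies b) ∧ (Dom_get_max_b_indicies (pvRaiseWitness_get_max_b_indicies) ∧ Raises_get_max_b_indicies (pvRaiseWitness_get_max_b_indicies) ∧ get_max_b_indicies_alt (pvRaiseWitness_get_max_b_indicies) = pvRaiseWitnessOut_get_max_b_indicies)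

-- ===== LEMMAS AND PROOFS =====

-- the value of cell (i,j) (with defaults; inside bounds it is the Python value b[i][j])
def pvCell (b : List (List Int)) (i j : Nat) : Int := (b.getD i []).getD j 0
def pvRlen (b : List (List Int)) (i : Nat) : Nat := (b.getD i []).length

-- (gi,gj) is the first row-major argmax over the cell set P
def pvGood (b : List (List Int)) (P : Nat → Nat → Prop) (gi gj : Nat) : Prop :=
  P gi gj ∧ (∀ i j, P i j → pvCell b i j ≤ pvCell b gi gj) ∧
  (∀ i j, P i j → (i < gi ∨ (i = gi ∧ j < gj)) → pvCell b i j < pvCell b gi gj)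

theorem pvGood_congr {b : List (List Int)} {P Q : Nat → Nat → Prop} {gi gj : Nat}
    (hPQ : ∀ i j, P i j ↔ Q i j) (h : pvGood b P gi gj) : pvGood b Q gi gj := by
  obtain ⟨h1, h2, h3⟩ := h
  exact ⟨(hPQ _ _).1 h1, fun i j hij => h2 i j ((hPQ i j).2 hij),
    fun i j hij => h3 i j ((hPQ i j).2 hij)⟩

theorem pvGood_unique {b : List (List Int)} {P : Nat → Nat → Prop} {gi gj gi' gj' : Nat}
    (h : pvGood b P gi gj) (h' : pvGood b P gi' gj') : gi = gi' ∧ gj = gj' := by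
  obtain ⟨m1, le1, lt1⟩ := h
  obtain ⟨m2, le2, lt2⟩ := h'
  rcases Nat.lt_trichotomy gi gi' with hlt | heq | hgt
  · exact absurd (le1 _ _ m2) (not_le.mpr (lt2 _ _ m1 (Or.inl hlt)))
  · subst heq
    rcases Nat.lt_trichotomy gj gj' with hlt | heq | hgt
    · exact absurd (le1 _ _ m2) (not_le.mpr (lt2 _ _ m1 (Or.inr ⟨rfl, hlt⟩)))
    · exact ⟨rfl, heq⟩
    · exact absurd (le2 _ _ m1) (not_le.mpr (lt1 _ _ m2 (Or.inr ⟨rfl, hgt⟩)))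
  · exact absurd (le2 _ _ m1) (not_le.mpr (lt1 _ _ m2 (Or.inl hgt)))

-- cells scanned by A after k rows ((0,0) is read by A before any update)
def pvPA (b : List (List Int)) (k : Nat) (i j : Nat) : Prop :=
  (i = 0 ∧ j = 0) ∨ (i < k ∧ j < pvRlen b i)
-- cells covered by B after k rows
def pvPB (b : List (List Int)) (k : Nat) (i j : Nat) : Prop :=
  i < k ∧ j < pvRlen b i

def pvInv (b : List (List Int)) (P : Nat → Nat → Prop) (st : Int × Int) : Prop :=
  ∃ gi gj : Nat, st = ((gi : Int), (gj : Int)) ∧ pvGood b P gi gj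

-- Nat-indexed normal forms of the two folds (same computations, casts pushed in)
def pvStep (b : List (List Int)) (i : Nat) (st : Int × Int) (j : Nat) : Int × Int :=
  if PySem.List.pyGetD (PySem.List.pyGetD b st.1 []) st.2 0 < pvCell b i j
  then ((i : Int), (j : Int)) else st

def pvRow (b : List (List Int)) (st : Int × Int) (i : Nat) : Int × Int :=
  (List.range (pvRlen b i)).foldl (pvStep b i) st

def pvBStep (acc : Option (Int × Int × Int)) (p : Int × List Int) :
    Option (Int × Int × Int) :=
  if p.2 = [] then acc
  else
    let v : Int := (PySem.List.max? p.2 id).getD 0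
    let j : Nat := (PySem.List.index? p.2 v).getD 0
    match acc with
    | none => some (v, p.1, (j : Int))
    | some b0 => if b0.1 < v then some (v, p.1, (j : Int)) else acc

theorem pvA_eq (b : List (List Int)) :
    get_max_b_indicies b = (List.range b.length).foldl (pvRow b) (0, 0) := by
  unfold get_max_b_indicies pvRow pvStep pvCell pvRlen
  simp only [PySem.List.pyRange_zero_natCast, List.foldl_map, PySem.List.pyGetD_natCast]

theorem pvB_eq (b : List (List Int)) :
    get_max_b_indicies_alt b =
      match (PySem.List.enumerate b 0).foldl (pvBStep) none with
      | none => ((0 : Int), (0 : Int))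
      | some t => (t.2.1, t.2.2) := by
  unfold get_max_b_indicies_alt pvBStep
  rfl

-- processing one cell of row i preserves the argmax invariant
theorem pvA_step_inv (b : List (List Int)) (i m : Nat) (P : Nat → Nat → Prop)
    (hP : ∀ x y, P x y → x < i ∨ (x = i ∧ y = 0))
    (st : Int × Int) (h : pvInv b (fun x y => P x y ∨ (x = i ∧ y < m)) st) :
    pvInv b (fun x y => P x y ∨ (x = i ∧ y < m + 1)) (pvStep b i st m) := by
  obtain ⟨gi, gj, hst, hmem, hle, hlt⟩ := h
  subst hst
  unfold pvStep
  simp only [PySem.List.pyGetD_natCast]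
  have hcur : ((b.getD gi []).getD gj 0) = pvCell b gi gj := rfl
  rw [hcur]
  split_ifs with hc
  · refine ⟨i, m, rfl, Or.inr ⟨rfl, by omega⟩, ?_, ?_⟩
    · rintro x y (hxy | ⟨rfl, hy⟩)
      · exact le_of_lt (lt_of_le_of_lt (hle x y (Or.inl hxy)) hc)
      · rcases Nat.lt_or_ge y m with hym | hym
        · exact le_of_lt (lt_of_le_of_lt (hle _ y (Or.inr ⟨rfl, hym⟩)) hc)
        · have : y = m := by omega
          subst this; exact le_refl _
    · rintro x y (hxy | ⟨rfl, hy⟩) hbef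
      · exact lt_of_le_of_lt (hle x y (Or.inl hxy)) hc
      · rcases Nat.lt_or_ge y m with hym | hym
        · exact lt_of_le_of_lt (hle _ y (Or.inr ⟨rfl, hym⟩)) hc
        · omega
  · refine ⟨gi, gj, rfl, ?_, ?_, ?_⟩
    · rcases hmem with hm | ⟨h1, h2⟩
      · exact Or.inl hm
      · exact Or.inr ⟨h1, by omega⟩
    · rintro x y (hxy | ⟨rfl, hy⟩)
      · exact hle x y (Or.inl hxy)
      · rcases Nat.lt_or_ge y m with hym | hym
        · exact hle _ y (Or.inr ⟨rfl, hym⟩)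
        · have : y = m := by omega
          subst this; exact not_lt.mp hc
    · rintro x y (hxy | ⟨rfl, hy⟩) hbef
      · exact hlt x y (Or.inl hxy) hbef
      · rcases Nat.lt_or_ge y m with hym | hym
        · exact hlt _ y (Or.inr ⟨rfl, hym⟩) hbef
        · rcases hmem with hm | ⟨h1, h2⟩
          · rcases hP gi gj hm with h' | ⟨h1, h2⟩ <;> omega
          · omega

theorem pvA_inner_inv (b : List (List Int)) (i : Nat) (P : Nat → Nat → Prop)
    (hP : ∀ x y, P x y → x < i ∨ (x = i ∧ y = 0))
    (st : Int × Int) (h : pvInv b P st) (m : Nat) :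
    pvInv b (fun x y => P x y ∨ (x = i ∧ y < m)) ((List.range m).foldl (pvStep b i) st) := by
  induction m with
  | zero =>
    obtain ⟨gi, gj, hst, hgood⟩ := h
    exact ⟨gi, gj, by simpa using hst, pvGood_congr (by intro x y; simp) hgood⟩
  | succ m ih =>
    rw [List.range_succ, List.foldl_append, List.foldl_cons, List.foldl_nil]
    exact pvA_step_inv b i m P hP _ ih

theorem pvA_char (b : List (List Int)) :
    pvInv b (pvPA b b.length) (get_max_b_indicies b) := by
  rw [pvA_eq]
  have h0 : pvInv b (pvPA b 0) ((0 : Int), (0 : Int)) := by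
    refine ⟨0, 0, by simp, Or.inl ⟨rfl, rfl⟩, ?_, ?_⟩
    · rintro x y (⟨rfl, rfl⟩ | ⟨h, _⟩)
      · exact le_refl _
      · omega
    · rintro x y (⟨rfl, rfl⟩ | ⟨h, _⟩) hbef
      · omega
      · omega
  have main : ∀ k, pvInv b (pvPA b k) ((List.range k).foldl (pvRow b) (0, 0)) := by
    intro k
    induction k with
    | zero => simpa using h0
    | succ k ih =>
      rw [List.range_succ, List.foldl_append, List.foldl_cons, List.foldl_nil]
      have hP : ∀ x y, pvPA b k x y → x < k ∨ (x = k ∧ y = 0) := by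
        rintro x y (⟨rfl, rfl⟩ | ⟨h1, h2⟩)
        · omega
        · omega
      have := pvA_inner_inv b k (pvPA b k) hP _ ih (pvRlen b k)
      obtain ⟨gi, gj, hst, hgood⟩ := this
      refine ⟨gi, gj, hst, pvGood_congr ?_ hgood⟩
      intro x y
      unfold pvPA
      constructor
      · rintro ((⟨rfl, rfl⟩ | ⟨h1, h2⟩) | ⟨rfl, h2⟩)
        · exact Or.inl ⟨rfl, rfl⟩
        · exact Or.inr ⟨by omega, h2⟩
        · exact Or.inr ⟨by omega, h2⟩
      · rintro (⟨rfl, rfl⟩ | ⟨h1, h2⟩)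
        · exact Or.inl (Or.inl ⟨rfl, rfl⟩)
        · rcases Nat.lt_or_ge x k with hx | hx
          · exact Or.inl (Or.inr ⟨hx, h2⟩)
          · have : x = k := by omega
            subst this; exact Or.inr ⟨rfl, h2⟩
  exact main b.length

-- per-row best: max? then index? gives the row's first argmax
theorem pvRowBest (row : List Int) (hne : row ≠ []) :
    ∃ v j, (PySem.List.max? row id).getD 0 = v ∧ (PySem.List.index? row v).getD 0 = j ∧
      j < row.length ∧ row.getD j 0 = v ∧
      (∀ t, t < row.length → row.getD t 0 ≤ v) ∧ (∀ t, t < j → row.getD t 0 < v) := by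
  have hsome : (PySem.List.max? row id).isSome := by
    cases row with
    | nil => simp at hne
    | cons x t =>
      simp only [PySem.List.max?]
      induction t generalizing x <;> simp_all [List.foldl]
      split <;> simp_all
  obtain ⟨m, hm⟩ := Option.isSome_iff_exists.mp hsome
  have hmem : m ∈ row := PySem.List.max?_mem hm
  have hmax : ∀ y ∈ row, y ≤ m := by
    have := PySem.List.max?_isMax (κ := Int) (key := id) hm
    simpa using this
  obtain ⟨jj, hjj⟩ : ∃ jj, List.idxOf? m row = some jj := by
    have : (List.idxOf? m row).isSome := by
      rw [List.isSome_idxOf?]; exact hmem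
    exact Option.isSome_iff_exists.mp this
  obtain ⟨hjlen, hjval, hjfirst⟩ := List.idxOf?_eq_some_iff.mp hjj
  refine ⟨m, jj, by simp [hm], by simp [PySem.List.index?, hjj], hjlen, ?_, ?_, ?_⟩
  · rw [List.getD_eq_getElem _ _ hjlen]; exact hjval
  · intro t ht
    rw [List.getD_eq_getElem _ _ ht]
    exact hmax _ (List.getElem_mem ht)
  · intro t ht
    have htlen : t < row.length := lt_trans ht hjlen
    rw [List.getD_eq_getElem _ _ htlen]
    exact lt_of_le_of_ne (hmax _ (List.getElem_mem htlen)) (hjfirst t ht)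

def pvBInv (b : List (List Int)) (k : Nat) (acc : Option (Int × Int × Int)) : Prop :=
  (acc = none ∧ ∀ i, i < k → pvRlen b i = 0) ∨
  (∃ v : Int, ∃ gi gj : Nat, acc = some (v, (gi : Int), (gj : Int)) ∧
    v = pvCell b gi gj ∧ pvGood b (pvPB b k) gi gj)

theorem pvB_fold (b : List (List Int)) :
    ∀ (rows : List (List Int)) (k : Nat) (acc : Option (Int × Int × Int)),
      b.drop k = rows → pvBInv b k acc →
      ∃ k', b.length ≤ k' ∧ pvBInv b k' ((PySem.List.enumerate rows (k : Int)).foldl (pvBStep) acc) := by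
  intro rows
  induction rows with
  | nil =>
    intro k acc hdrop hinv
    refine ⟨k, ?_, by simpa [PySem.List.enumerate] using hinv⟩
    have := congrArg List.length hdrop
    simp [List.length_drop] at this
    omega
  | cons r rs ih =>
    intro k acc hdrop hinv
    have hk : k < b.length := by
      have := congrArg List.length hdrop
      simp [List.length_drop] at this
      omega
    have hopt : b[k]? = some r := by
      rw [← List.head?_drop, hdrop]; rfl
    have hgetd : b.getD k [] = r := by
      simp [List.getD, hopt]
    have hdrop' : b.drop (k + 1) = rs := by
      have : (b.drop k).tail = b.drop (k + 1) := by
        rw [List.tail_drop]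
      rw [← this, hdrop]; rfl
    have hstep : pvBInv b (k + 1) (pvBStep acc ((k : Int), r)) := by
      unfold pvBStep
      by_cases hre : r = []
      · simp only [hre]
        -- empty row: the cell set does not grow
        rcases hinv with ⟨rfl, hall⟩ | ⟨v, gi, gj, rfl, hv, hgood⟩
        · refine Or.inl ⟨rfl, ?_⟩
          intro i hi
          rcases Nat.lt_or_ge i k with h | h
          · exact hall i h
          · have : i = k := by omega
            subst this; simp [pvRlen, List.getD, hopt, hre]
        · refine Or.inr ⟨v, gi, gj, rfl, hv, pvGood_congr ?_ hgood⟩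
          intro x y
          unfold pvPB
          constructor
          · rintro ⟨h1, h2⟩; exact ⟨by omega, h2⟩
          · rintro ⟨h1, h2⟩
            rcases Nat.lt_or_ge x k with h | h
            · exact ⟨h, h2⟩
            · have : x = k := by omega
              subst this
              simp [pvRlen, List.getD, hopt, hre] at h2
      · simp only [if_neg hre]
        obtain ⟨v, j, hv, hj, hjlen, hjval, hmax, hfirst⟩ := pvRowBest r hre
        simp only [hv, hj]
        have hcell : ∀ t, pvCell b k t = r.getD t 0 := by
          intro t; simp [pvCell, List.getD, hopt]
        have hrlen : pvRlen b k = r.length := by simp [pvRlen, List.getD, hopt]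
        rcases hinv with ⟨rfl, hall⟩ | ⟨v0, gi, gj, rfl, hv0, hgood⟩
        · refine Or.inr ⟨v, k, j, rfl, by rw [hcell, hjval], ?_⟩
          have hemp : ∀ x y, x < k → ¬ (y < pvRlen b x) := by
            intro x y hx; rw [hall x hx]; omega
          refine ⟨⟨by omega, by omega⟩, ?_, ?_⟩
          · rintro x y ⟨h1, h2⟩
            rcases Nat.lt_or_ge x k with h | h
            · exact absurd h2 (hemp x y h)
            · have : x = k := by omega
              subst this
              rw [hcell, hcell, hjval]
              exact hmax y (by omega)
          · rintro x y ⟨h1, h2⟩ hbef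
            rcases Nat.lt_or_ge x k with h | h
            · exact absurd h2 (hemp x y h)
            · have : x = k := by omega
              subst this
              rw [hcell, hcell, hjval]
              exact hfirst y (by omega)
        · obtain ⟨hmem0, hle0, hlt0⟩ := hgood
          have hgik : gi < k := hmem0.1
          by_cases hcmp : v0 < v
          · simp only [if_pos hcmp]
            refine Or.inr ⟨v, k, j, rfl, by rw [hcell, hjval], ?_, ?_, ?_⟩
            · exact ⟨by omega, by omega⟩
            · rintro x y ⟨h1, h2⟩
              rcases Nat.lt_or_ge x k with h | h
              · rw [hcell, hjval]
                calc pvCell b x y ≤ pvCell b gi gj := hle0 x y ⟨h, h2⟩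
                  _ = v0 := hv0.symm
                  _ ≤ v := le_of_lt hcmp
              · have : x = k := by omega
                subst this
                rw [hcell, hcell, hjval]
                exact hmax y (by omega)
            · rintro x y ⟨h1, h2⟩ hbef
              rcases Nat.lt_or_ge x k with h | h
              · rw [hcell, hjval]
                calc pvCell b x y ≤ pvCell b gi gj := hle0 x y ⟨h, h2⟩
                  _ = v0 := hv0.symm
                  _ < v := hcmp
              · have : x = k := by omega
                subst this
                rw [hcell, hcell, hjval]
                exact hfirst y (by omega)
          · simp only [if_neg hcmp]
            refine Or.inr ⟨v0, gi, gj, rfl, hv0, ?_, ?_, ?_⟩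
            · exact ⟨by omega, hmem0.2⟩
            · rintro x y ⟨h1, h2⟩
              rcases Nat.lt_or_ge x k with h | h
              · exact hle0 x y ⟨h, h2⟩
              · have : x = k := by omega
                subst this
                rw [← hv0]
                calc pvCell b x y = r.getD y 0 := hcell y
                  _ ≤ v := hmax y (by omega)
                  _ ≤ v0 := not_lt.mp hcmp
            · rintro x y ⟨h1, h2⟩ hbef
              rcases Nat.lt_or_ge x k with h | h
              · exact hlt0 x y ⟨h, h2⟩ hbef
              · have : x = k := by omega
                subst this
                omega
    have hcons : PySem.List.enumerate (r :: rs) (k : Int) =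
        ((k : Int), r) :: PySem.List.enumerate rs ((k : Int) + 1) := by
      simp [PySem.List.enumerate]
    rw [hcons, List.foldl_cons]
    have : ((k : Int) + 1) = ((k + 1 : Nat) : Int) := by push_cast; ring
    rw [this]
    exact ih (k + 1) _ hdrop' hstep

theorem pvBInv_final (b : List (List Int)) (k : Nat) (hk : b.length ≤ k)
    (acc : Option (Int × Int × Int)) (h : pvBInv b k acc) : pvBInv b b.length acc := by
  rcases h with ⟨rfl, hall⟩ | ⟨v, gi, gj, rfl, hv, hgood⟩
  · exact Or.inl ⟨rfl, fun i hi => hall i (by omega)⟩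
  · refine Or.inr ⟨v, gi, gj, rfl, hv, pvGood_congr ?_ hgood⟩
    intro x y
    unfold pvPB
    constructor
    · rintro ⟨h1, h2⟩
      rcases Nat.lt_or_ge x b.length with h | h
      · exact ⟨h, h2⟩
      · exfalso
        have hx : b.getD x [] = [] := List.getD_eq_default _ _ h
        rw [show pvRlen b x = (b.getD x []).length from rfl, hx] at h2
        simp at h2
    · rintro ⟨h1, h2⟩; exact ⟨by omega, h2⟩

theorem pvB_char (b : List (List Int)) :
    pvBInv b b.length ((PySem.List.enumerate b 0).foldl (pvBStep) none) := by
  have h0 : pvBInv b 0 none := Or.inl ⟨rfl, by omega⟩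
  obtain ⟨k', hk', hinv⟩ := pvB_fold b b 0 none (by simp) h0
  have hinv' : pvBInv b k' ((PySem.List.enumerate b 0).foldl (pvBStep) none) := by
    simpa using hinv
  exact pvBInv_final b k' hk' _ hinv'

theorem get_max_b_indicies_spec : Claim_equal_get_max_b_indicies := by
  unfold Claim_equal_get_max_b_indicies
  intro b _ hpre
  unfold Spec_get_max_b_indicies
  obtain ⟨gi, gj, hA, hgoodA⟩ := pvA_char b
  have hB := pvB_char b
  rw [pvB_eq b]
  rcases hB with ⟨hnone, hall⟩ | ⟨v, gi', gj', hsome, hv, hgoodB⟩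
  · -- every row is empty: A's state was never updated
    rw [hnone]
    rw [hA]
    obtain ⟨hmem, _, _⟩ := hgoodA
    rcases hmem with ⟨rfl, rfl⟩ | ⟨h1, h2⟩
    · simp
    · exact absurd h2 (by rw [hall gi h1]; omega)
  · rw [hsome]
    rw [hA]
    -- some row is non-empty, so Pre_ says the first row is non-empty
    have hne : ¬ (∀ r ∈ b, r = []) := by
      intro hall
      obtain ⟨⟨h1, h2⟩, _, _⟩ := hgoodB
      have hmem : b.getD gi' [] ∈ b := by
        rw [List.getD_eq_getElem _ _ h1]
        exact List.getElem_mem h1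
      have hempty := hall _ hmem
      rw [show pvRlen b gi' = (b.getD gi' []).length from rfl, hempty] at h2
      simp at h2
    have hhead : b.head?.getD [] ≠ [] := hpre.resolve_left hne
    have hblen : 0 < b.length := by
      cases b with
      | nil => simp at hhead
      | cons x t => simp
    have hr0 : 0 < pvRlen b 0 := by
      cases b with
      | nil => simp at hhead
      | cons x t =>
        simp at hhead
        simp [pvRlen, List.length_pos_iff]
        exact hhead
    have hgoodA' : pvGood b (pvPB b b.length) gi gj := by
      refine pvGood_congr ?_ hgoodA
      intro x y
      unfold pvPA pvPB
      constructor
      · rintro (⟨rfl, rfl⟩ | h)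
        · exact ⟨hblen, hr0⟩
        · exact h
      · exact fun h => Or.inr h
    obtain ⟨he1, he2⟩ := pvGood_unique hgoodA' hgoodB
    subst he1; subst he2
    rfl

@[simp] theorem get_max_b_indicies_raises : Claim_raises_get_max_b_indicies := by
  unfold Claim_raises_get_max_b_indicies
  constructor
  · rintro b _ ⟨h1, r, hr, hrne⟩ hpre
    rcases hpre with hall | hhead
    · exact hrne (hall r hr)
    · exact hhead h1
  · exact ⟨by decide, by decide, by decide⟩
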